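-- pv_equiv track=rewrite | github.com/TungnxUIT/CE222.STICK-DIAGRAM | expression_euler_path.py | count_max_degree
-- ===== SOURCE A (Python) =====
-- def count_max_degree(expression):
--     max_count = 0
--     count = 0
--     for char in expression:
--         if char == '(':
--             count = 0
--         elif char == ')':
--             max_count = max(max_count, count)
--             count = 0
--         elif char == '+':
--             count += 1
--     return max(max_count, count) + 2
-- ===== SOURCE B (Python) =====
-- def count_max_degree(expression):
--     # two-phase: tokenize into paren-free segments (dropping segments that end
--     # at a '(' since those are never flushed), then reduce with str.count
--     chunks = expression.split('(')
--     segs = [seg for chunk in chunks[:-1] for seg in chunk.split(')')[:-1]]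
--     segs += chunks[-1].split(')')
--     best = 0
--     for seg in segs:
--         best = max(best, seg.count('+'))
--     return best + 2
-- ===== Notes on version B (the rewrite author's own statement) =====
-- stated objective: faster
-- what changed: Replaces A's single stateful character loop (running count, reset/flush on parens) by a two-phase split-and-count: split on '(' into chunks, split each chunk on ')' keeping exactly the segments A flushes (dropping each chunk's trailing segment except in the last chunk), then take the max of seg.count('+') and add 2.
import Mathlib
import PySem

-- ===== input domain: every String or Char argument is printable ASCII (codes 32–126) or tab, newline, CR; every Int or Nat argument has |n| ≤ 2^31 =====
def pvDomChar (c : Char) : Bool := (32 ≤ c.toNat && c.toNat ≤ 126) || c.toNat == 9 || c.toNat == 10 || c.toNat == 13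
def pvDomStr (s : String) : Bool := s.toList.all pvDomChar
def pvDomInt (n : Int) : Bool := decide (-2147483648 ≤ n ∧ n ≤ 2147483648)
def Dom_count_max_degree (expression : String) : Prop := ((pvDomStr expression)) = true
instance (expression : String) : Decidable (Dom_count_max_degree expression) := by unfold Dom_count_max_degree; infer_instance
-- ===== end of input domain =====

-- B replaces A's single stateful character loop by a two-phase split-and-count
-- (tokenize into paren-free segments, then reduce with str.count); objective: alternative decomposition.

-- ===== PORT A =====
-- literal transliteration of A: one fold over the characters carrying (max_count, count)
def count_max_degree (expression : String) : Int :=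
  let st := expression.toList.foldl (fun (s : Int × Int) char =>
      if char = '(' then (s.1, 0)
      else if char = ')' then (max s.1 s.2, 0)
      else if char = '+' then (s.1, s.2 + 1)
      else s) ((0 : Int), (0 : Int))
  max st.1 st.2 + 2

-- ===== PORT B =====
-- literal transliteration of Source B: expression.split('(') → chunks; each non-final chunk
-- contributes chunk.split(')')[:-1]; the final chunk contributes all of chunk.split(')');
-- then a fold taking max of seg.count('+').
def count_max_degree_alt (expression : String) : Int :=
  let chunks := PySem.Chars.splitOn expression.toList ['(']
  let segs := (chunks.dropLast.flatMap (fun chunk => (PySem.Chars.splitOn chunk [')']).dropLast))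
              ++ PySem.Chars.splitOn ((chunks.getLast?).getD []) [')']
  segs.foldl (fun best seg => max best ((PySem.Chars.count seg ['+'] : Int))) 0 + 2

-- ===== PRECONDITION & SPEC =====
def Spec_count_max_degree (expression : String) (out : Int) : Prop := out = count_max_degree_alt expression
instance (expression : String) (out : Int) : Decidable (Spec_count_max_degree expression out) := by unfold Spec_count_max_degree; infer_instance

-- ===== CLAIM (what is proved, stated in full; the proofs are below) =====
def Claim_equal_count_max_degree : Prop := ∀ (expression : String), Dom_count_max_degree expression → Spec_count_max_degree expression (count_max_degree expression)

-- ===== LEMMAS AND PROOFS =====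

-- PySem.Chars.splitOn with a single-character separator is List.splitOn
lemma pvGo_splitOn (d : Char) : ∀ (fuel : Nat) (l cur : List Char) (acc : List (List Char)),
    l.length ≤ fuel →
    PySem.Chars.splitOn.go [d] fuel l cur acc
      = acc.reverse ++ (List.splitOn d l).modifyHead (cur.reverse ++ ·) := by
  intro fuel
  induction fuel with
  | zero =>
    intro l cur acc h
    have hl : l = [] := List.eq_nil_of_length_eq_zero (Nat.le_zero.mp h)
    subst hl
    simp [PySem.Chars.splitOn.go, List.splitOn]
  | succ n ih =>
    intro l cur acc h
    cases l with
    | nil => simp [PySem.Chars.splitOn.go, List.splitOn]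
    | cons c rest =>
      have hlen : rest.length ≤ n := by simpa using h
      have hunf : PySem.Chars.splitOn.go [d] (n+1) (c :: rest) cur acc =
          if [d].isPrefixOf (c :: rest) then
            PySem.Chars.splitOn.go [d] n ((c :: rest).drop 1) [] (cur.reverse :: acc)
          else PySem.Chars.splitOn.go [d] n rest (c :: cur) acc := by
        simp [PySem.Chars.splitOn.go]
      by_cases hc : c = d
      · subst hc
        rw [hunf, if_pos (by simp [List.isPrefixOf])]
        rw [List.drop_one, List.tail_cons, ih _ _ _ hlen]
        obtain ⟨h1, t1, hst⟩ := List.exists_cons_of_ne_nil (List.splitOnP_ne_nil (· == c) rest)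
        simp [List.splitOn, List.splitOnP_cons, hst]
      · rw [hunf, if_neg (by simp [List.isPrefixOf]; exact fun hdc => hc hdc.symm)]
        rw [ih _ _ _ hlen]
        obtain ⟨h1, t1, hst⟩ := List.exists_cons_of_ne_nil (List.splitOnP_ne_nil (· == d) rest)
        simp [List.splitOn, List.splitOnP_cons, hst, hc]

lemma pvSplitOn_char (d : Char) (s : List Char) :
    PySem.Chars.splitOn s [d] = List.splitOn d s := by
  unfold PySem.Chars.splitOn
  rw [pvGo_splitOn d (s.length + 1) s [] [] (Nat.le_succ _)]
  obtain ⟨h1, t1, hst⟩ := List.exists_cons_of_ne_nil (List.splitOnP_ne_nil (· == d) s)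
  simp [List.splitOn] at hst ⊢
  simp [hst]

-- PySem.Chars.count with a single-character needle is List.count
lemma pvGo_count (d : Char) : ∀ (fuel : Nat) (l : List Char) (acc : Nat),
    l.length ≤ fuel → PySem.Chars.count.go [d] fuel l acc = acc + l.count d := by
  intro fuel
  induction fuel with
  | zero =>
    intro l acc h
    have hl : l = [] := List.eq_nil_of_length_eq_zero (Nat.le_zero.mp h)
    subst hl
    simp [PySem.Chars.count.go]
  | succ n ih =>
    intro l acc h
    cases l with
    | nil => simp [PySem.Chars.count.go]
    | cons c rest =>
      have hlen : rest.length ≤ n := by simpa using h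
      have hunf : PySem.Chars.count.go [d] (n+1) (c :: rest) acc =
          if [d].isPrefixOf (c :: rest) then
            PySem.Chars.count.go [d] n ((c :: rest).drop 1) (acc + 1)
          else PySem.Chars.count.go [d] n rest acc := by
        simp [PySem.Chars.count.go]
      by_cases hc : c = d
      · subst hc
        rw [hunf, if_pos (by simp [List.isPrefixOf])]
        rw [List.drop_one, List.tail_cons, ih _ _ hlen]
        simp
        omega
      · rw [hunf, if_neg (by simp [List.isPrefixOf]; exact fun hdc => hc hdc.symm)]
        rw [ih _ _ hlen]
        simp [hc]

lemma pvCount_char (d : Char) (s : List Char) :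
    PySem.Chars.count s [d] = s.count d := by
  unfold PySem.Chars.count
  rw [if_neg (by simp)]
  simpa using pvGo_count d s.length s 0 le_rfl

-- the segments B lists, phrased over List.splitOn
def pvSegs (cs : List Char) : List (List Char) :=
  let chunks := List.splitOn '(' cs
  (chunks.dropLast.flatMap (fun chunk => (List.splitOn ')' chunk).dropLast))
    ++ List.splitOn ')' ((chunks.getLast?).getD [])

def pvCnt (s : List Char) : Int := (s.count '+' : Int)

def pvM (cs : List Char) : Int :=
  (pvSegs cs).foldl (fun best seg => max best (pvCnt seg)) 0

-- A's flush semantics as a structural recursion on the characters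
def pvG : List Char → Int → Int
  | [], c => c
  | ch :: cs, c =>
      if ch = '(' then pvG cs 0
      else if ch = ')' then max c (pvG cs 0)
      else if ch = '+' then pvG cs (c + 1)
      else pvG cs c

lemma pvFold_g (cs : List Char) : ∀ (m c : Int),
    max ((cs.foldl (fun (s : Int × Int) char =>
        if char = '(' then (s.1, 0)
        else if char = ')' then (max s.1 s.2, 0)
        else if char = '+' then (s.1, s.2 + 1)
        else s) (m, c))).1
      ((cs.foldl (fun (s : Int × Int) char =>
        if char = '(' then (s.1, 0)
        else if char = ')' then (max s.1 s.2, 0)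
        else if char = '+' then (s.1, s.2 + 1)
        else s) (m, c))).2 = max m (pvG cs c) := by
  induction cs with
  | nil => intro m c; simp [pvG]
  | cons ch rest ih =>
    intro m c
    simp only [List.foldl_cons]
    by_cases h1 : ch = '('
    · subst h1
      simpa [pvG] using ih m 0
    · by_cases h2 : ch = ')'
      · subst h2
        simpa [pvG, max_assoc] using ih (max m c) 0
      · by_cases h3 : ch = '+'
        · subst h3
          simpa [pvG] using ih m (c + 1)
        · simpa [pvG, h1, h2, h3] using ih m c

lemma pvFoldMax_out (l : List (List Char)) : ∀ (a b : Int),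
    l.foldl (fun best seg => max best (pvCnt seg)) (max a b)
      = max a (l.foldl (fun best seg => max best (pvCnt seg)) b) := by
  induction l with
  | nil => intro a b; simp
  | cons x l ih =>
    intro a b
    simp only [List.foldl_cons, max_assoc]
    exact ih a (max b (pvCnt x))

lemma pvCnt_nonneg (s : List Char) : 0 ≤ pvCnt s := Int.natCast_nonneg _

lemma pvM_nonneg (cs : List Char) : 0 ≤ pvM cs := by
  unfold pvM
  have h := pvFoldMax_out (pvSegs cs) 0 0
  simp only [max_self] at h
  rw [h]
  exact le_max_left _ _

-- characters that are neither paren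
def pvQ (ch : Char) : Bool := !(ch == '(' || ch == ')')

lemma pvG_prefix (p : List Char) (hp : ∀ x ∈ p, pvQ x = true) :
    ∀ (cs : List Char) (c : Int), pvG (p ++ cs) c = pvG cs (c + pvCnt p) := by
  induction p with
  | nil => intro cs c; simp [pvCnt]
  | cons x p ih =>
    intro cs c
    have hx : pvQ x = true := hp x (by simp)
    have hxp : ∀ y ∈ p, pvQ y = true := fun y hy => hp y (by simp [hy])
    have hx1 : x ≠ '(' := by simp [pvQ] at hx; exact hx.1
    have hx2 : x ≠ ')' := by simp [pvQ] at hx; exact hx.2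
    by_cases hx3 : x = '+'
    · subst hx3
      rw [List.cons_append,
        show ∀ X, pvG ('+' :: (p ++ cs)) X = pvG (p ++ cs) (X + 1) from fun X => by
          simp [pvG],
        ih hxp cs (c + 1),
        show pvCnt ('+' :: p) = pvCnt p + 1 from by simp [pvCnt]]
      congr 1
      ring
    · simp only [List.cons_append, pvG, if_neg hx1, if_neg hx2, if_neg hx3]
      rw [ih hxp cs c]
      congr 1
      simp [pvCnt, hx3]

lemma pvSplitOnP_prefix (f : Char → Bool) (p : List Char) (hp : ∀ x ∈ p, f x = false) :
    ∀ (l : List Char), List.splitOnP f (p ++ l) = (List.splitOnP f l).modifyHead (p ++ ·) := by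
  induction p with
  | nil =>
    intro l
    obtain ⟨h1, t1, hst⟩ := List.exists_cons_of_ne_nil (List.splitOnP_ne_nil f l)
    simp [hst]
  | cons x p ih =>
    intro l
    have hx : f x = false := hp x (by simp)
    have hxp : ∀ y ∈ p, f y = false := fun y hy => hp y (by simp [hy])
    obtain ⟨h1, t1, hst⟩ := List.exists_cons_of_ne_nil (List.splitOnP_ne_nil f l)
    simp only [List.cons_append, List.splitOnP_cons, hx, Bool.false_eq_true,
      ih hxp l, hst]
    simp

-- splitOn of a separator-free list
lemma pvSplitOnP_free (f : Char → Bool) (p : List Char) (hp : ∀ x ∈ p, f x = false) :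
    List.splitOnP f p = [p] := by
  have := pvSplitOnP_prefix f p hp []
  simpa [List.splitOnP_nil] using this

lemma pvDropWhile_head (p : Char → Bool) (l : List Char) (x : Char) (xs : List Char)
    (h : l.dropWhile p = x :: xs) : p x = false := by
  induction l with
  | nil => simp at h
  | cons a l ih =>
    rw [List.dropWhile_cons] at h
    by_cases ha : p a = true
    · rw [if_pos ha] at h; exact ih h
    · rw [if_neg ha] at h
      obtain ⟨rfl, -⟩ := List.cons_eq_cons.mp h
      simpa using ha

lemma pvMain (cs : List Char) : pvG cs 0 = pvM cs := by
  have hq : ∀ x ∈ cs.takeWhile pvQ, pvQ x = true := fun x hx => List.mem_takeWhile_imp hx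
  have hfree1 : ∀ x ∈ cs.takeWhile pvQ, ((fun x => x == '(') : Char → Bool) x = false := by
    intro x hx; have := hq x hx; simp [pvQ] at this; simp [this.1]
  have hfree2 : ∀ x ∈ cs.takeWhile pvQ, ((fun x => x == ')') : Char → Bool) x = false := by
    intro x hx; have := hq x hx; simp [pvQ] at this; simp [this.2]
  have hsplit : cs.takeWhile pvQ ++ cs.dropWhile pvQ = cs := List.takeWhile_append_dropWhile
  set p := cs.takeWhile pvQ with hp
  have hgp : ∀ (cs' : List Char) (c : Int), pvG (p ++ cs') c = pvG cs' (c + pvCnt p) :=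
    pvG_prefix p hq
  cases hr : cs.dropWhile pvQ with
  | nil =>
    -- cs is paren-free: a single segment, never flushed except at the end
    have hcs : cs = p := by rw [← hsplit, hr, List.append_nil]
    have hsp1 : List.splitOn '(' p = [p] := pvSplitOnP_free _ p hfree1
    have hsp2 : List.splitOn ')' p = [p] := pvSplitOnP_free _ p hfree2
    have hg : pvG p 0 = pvCnt p := by
      have h := hgp [] 0
      rw [List.append_nil] at h
      simpa [pvG] using h
    rw [hcs, hg]
    unfold pvM pvSegs
    rw [hsp1]
    simp [hsp2, max_eq_right (pvCnt_nonneg p)]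
  | cons ch t =>
    have hch : pvQ ch = false := pvDropWhile_head pvQ cs ch t hr
    have hcs : cs = p ++ ch :: t := by rw [← hsplit, hr]
    have hlt : t.length < cs.length := by
      rw [hcs]; simp [List.length_append]; try omega
    have ihv : pvG t 0 = pvM t := pvMain t
    have hchor : ch = '(' ∨ ch = ')' := by
      by_cases h : ch = '('
      · exact Or.inl h
      · simp [pvQ, h] at hch
        exact Or.inr hch
    obtain ⟨c1, t1, hct⟩ := List.exists_cons_of_ne_nil (List.splitOnP_ne_nil (fun x => x == '(') t)
    rcases hchor with h | h
    · -- '(' : the pending prefix p is discarded, never flushed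
      subst h
      have hsplitcs : List.splitOnP (fun x => x == '(') (p ++ '(' :: t) = p :: c1 :: t1 := by
        rw [pvSplitOnP_prefix _ p hfree1 ('(' :: t), List.splitOnP_cons]
        simp [hct]
      rw [hcs, hgp ('(' :: t) 0,
        show ∀ X, pvG ('(' :: t) X = pvG t 0 from fun X => by simp [pvG], ihv]
      unfold pvM pvSegs
      simp only [List.splitOn]
      rw [hsplitcs, hct]
      simp only [List.dropLast_cons₂, List.flatMap_cons, List.getLast?_cons_cons]
      rw [show (List.splitOnP (fun x => x == ')') p).dropLast = [] from by
        rw [pvSplitOnP_free _ p hfree2]; rfl]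
      simp
    · -- ')' : the pending prefix p is flushed as a listed segment
      subst h
      have hfree1' : ∀ x ∈ p ++ [')'], ((fun x => x == '(') : Char → Bool) x = false := by
        intro x hx
        rcases List.mem_append.mp hx with hx | hx
        · exact hfree1 x hx
        · simp at hx; subst hx; decide
      have hsplitcs : List.splitOnP (fun x => x == '(') (p ++ ')' :: t)
          = (p ++ ')' :: c1) :: t1 := by
        rw [show p ++ ')' :: t = (p ++ [')']) ++ t from by simp,
          pvSplitOnP_prefix _ (p ++ [')']) hfree1' t, hct]
        simp
      have hsplitp : List.splitOnP (fun x => x == ')') (p ++ ')' :: c1)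
          = p :: List.splitOnP (fun x => x == ')') c1 := by
        rw [pvSplitOnP_prefix _ p hfree2 (')' :: c1), List.splitOnP_cons]
        simp
      have hsegs : pvSegs (p ++ ')' :: t) = p :: pvSegs t := by
        unfold pvSegs
        simp only [List.splitOn]
        rw [hsplitcs, hct]
        cases t1 with
        | nil => simp [hsplitp]
        | cons u uu =>
          obtain ⟨d1, d2, hdd⟩ :=
            List.exists_cons_of_ne_nil (List.splitOnP_ne_nil (fun x => x == ')') c1)
          simp only [List.dropLast_cons₂, List.flatMap_cons, List.getLast?_cons_cons]
          rw [hsplitp, hdd]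
          simp
      rw [hcs, hgp (')' :: t) 0,
        show ∀ X, pvG (')' :: t) X = max X (pvG t 0) from fun X => by simp [pvG], ihv,
        zero_add]
      unfold pvM
      rw [hsegs]
      simp only [List.foldl_cons]
      rw [show max 0 (pvCnt p) = max (pvCnt p) 0 from max_comm _ _, pvFoldMax_out]
termination_by cs.length
decreasing_by exact hlt

-- ===== VERDICT (by name: the statement is the Claim_ definition above) =====
theorem count_max_degree_spec : Claim_equal_count_max_degree := by
  intro expression _
  unfold Spec_count_max_degree count_max_degree count_max_degree_alt
  simp only [pvSplitOn_char, pvCount_char, pvFold_g]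
  rw [pvMain, max_eq_right (pvM_nonneg _)]
  unfold pvM pvSegs
  rfl
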